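-- pv_equiv track=rewrite | github.com/wangfaping0707/learningPythonProject | pac/bu/d87_密码强度等级.py | get_alpha_score
-- ===== SOURCE A (Python) =====
-- def get_alpha_score(pwd):
-- 	# 小写字母数量
-- 	num1 = 0
-- 	# 大写字母数量
-- 	num2 = 0
-- 	for i in pwd:
-- 		if i.islower():
-- 			num1 += 1
-- 		if i.isupper():
-- 			num2 += 1
-- 	# 全是小写或者全是大写
-- 	if (num1 != 0 and num2 == 0) or (num1 == 0 and num2 != 0):
-- 		return 10
-- 	elif num1 != 0 and num2 != 0:
-- 		return 20
-- 	else: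
-- 		return 0
-- ===== SOURCE B (Python) =====
-- def get_alpha_score(pwd):
--     score = 0
--     if any(c.islower() for c in pwd):
--         score += 10
--     if any(c.isupper() for c in pwd):
--         score += 10
--     return score
-- ===== Notes on version B (the rewrite author's own statement) =====
-- stated objective: idiomatic
-- what changed: Replaces the single counting loop plus three-way if/elif cascade with two staged short-circuiting any() presence tests, adding 10 per case present.
import Mathlib
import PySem

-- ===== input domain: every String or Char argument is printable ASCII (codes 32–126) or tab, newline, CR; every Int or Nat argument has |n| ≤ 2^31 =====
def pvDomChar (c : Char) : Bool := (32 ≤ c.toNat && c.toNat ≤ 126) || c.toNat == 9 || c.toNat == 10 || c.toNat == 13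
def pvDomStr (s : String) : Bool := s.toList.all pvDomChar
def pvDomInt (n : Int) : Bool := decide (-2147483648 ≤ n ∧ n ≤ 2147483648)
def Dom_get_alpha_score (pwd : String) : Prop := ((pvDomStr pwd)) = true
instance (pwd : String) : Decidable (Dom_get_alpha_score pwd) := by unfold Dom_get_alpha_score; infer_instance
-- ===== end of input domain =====

-- B replaces A's counting loop and if/elif cascade with two staged short-circuiting any() presence tests (idiomatic; return value only).
-- ===== PORT A =====
def get_alpha_score (pwd : String) : Int :=
  let st := pwd.toList.foldl (fun (p : Int × Int) i =>
    (if PySem.Chars.islower i then p.1 + 1 else p.1,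
     if PySem.Chars.isupper i then p.2 + 1 else p.2)) (0, 0)
  if (st.1 ≠ 0 ∧ st.2 = 0) ∨ (st.1 = 0 ∧ st.2 ≠ 0) then 10
  else if st.1 ≠ 0 ∧ st.2 ≠ 0 then 20
  else 0

-- ===== PORT B =====
def get_alpha_score_alt (pwd : String) : Int :=
  let score : Int := 0
  let score := if pwd.toList.any PySem.Chars.islower then score + 10 else score
  let score := if pwd.toList.any PySem.Chars.isupper then score + 10 else score
  score

-- ===== PRECONDITION & SPEC =====
def Spec_get_alpha_score (pwd : String) (out : Int) : Prop := out = get_alpha_score_alt pwd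
instance (pwd : String) (out : Int) : Decidable (Spec_get_alpha_score pwd out) := by unfold Spec_get_alpha_score; infer_instance

-- ===== CLAIM (what is proved, stated in full; the proofs are below) =====
def Claim_equal_get_alpha_score : Prop := ∀ (pwd : String), Dom_get_alpha_score pwd → Spec_get_alpha_score pwd (get_alpha_score pwd)

-- ===== LEMMAS AND PROOFS =====
-- A's fold result: each counter is n0 plus the countP of its predicate.
theorem pv_fold_count (l : List Char) (n1 n2 : Int) :
    l.foldl (fun (p : Int × Int) i =>
      (if PySem.Chars.islower i then p.1 + 1 else p.1,
       if PySem.Chars.isupper i then p.2 + 1 else p.2)) (n1, n2)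
    = (n1 + (l.countP PySem.Chars.islower : Int), n2 + (l.countP PySem.Chars.isupper : Int)) := by
  induction l generalizing n1 n2 with
  | nil => simp
  | cons c t ih =>
      simp only [List.foldl_cons, ih, List.countP_cons]
      rcases h1 : PySem.Chars.islower c <;> rcases h2 : PySem.Chars.isupper c <;>
        simp [Int.add_comm, Int.add_left_comm]

-- ===== VERDICT (by name: the statement is the Claim_ definition above) =====
theorem get_alpha_score_spec : Claim_equal_get_alpha_score := by
  intro pwd _
  unfold Spec_get_alpha_score get_alpha_score get_alpha_score_alt
  simp only [pv_fold_count, zero_add]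
  have h1 : (pwd.toList.countP PySem.Chars.islower = 0) ↔ (pwd.toList.any PySem.Chars.islower = false) := by
    simp [List.countP_eq_zero, List.any_eq_false]
  have h2 : (pwd.toList.countP PySem.Chars.isupper = 0) ↔ (pwd.toList.any PySem.Chars.isupper = false) := by
    simp [List.countP_eq_zero, List.any_eq_false]
  have b1 : pwd.toList.any PySem.Chars.islower = decide (pwd.toList.countP PySem.Chars.islower ≠ 0) := by
    by_cases hc : pwd.toList.countP PySem.Chars.islower = 0
    · simp [hc, h1.mp hc]
    · simp only [hc, decide_not]
      cases hb : pwd.toList.any PySem.Chars.islower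
      · exact absurd (h1.mpr hb) hc
      · simp
  have b2 : pwd.toList.any PySem.Chars.isupper = decide (pwd.toList.countP PySem.Chars.isupper ≠ 0) := by
    by_cases hc : pwd.toList.countP PySem.Chars.isupper = 0
    · simp [hc, h2.mp hc]
    · simp only [hc, decide_not]
      cases hb : pwd.toList.any PySem.Chars.isupper
      · exact absurd (h2.mpr hb) hc
      · simp
  rw [b1, b2]
  simp only [decide_eq_true_eq]
  split_ifs <;> first | rfl | omega
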